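-- pv_equiv track=rewrite | github.com/Rylang/pybites_intro | bite106.py | strip_vowels
-- ===== SOURCE A (Python) =====
-- text = """
-- The Zen of Python, by Tim Peters
--
-- Beautiful is better than ugly.
-- Explicit is better than implicit.
-- Simple is better than complex.
-- Complex is better than complicated.
-- Flat is better than nested.
-- Sparse is better than dense.
-- Readability counts.
-- Special cases aren't special enough to break the rules.
-- Although practicality beats purity.
-- Errors should never pass silently.
-- Unless explicitly silenced.
-- In the face of ambiguity, refuse the temptation to guess.
-- There should be one-- and preferably only one --obvious way to do it.
-- Although that way may not be obvious at first unless you're Dutch.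
-- Now is better than never.
-- Although never is often better than *right* now.
-- If the implementation is hard to explain, it's a bad idea.
-- If the implementation is easy to explain, it may be a good idea.
-- Namespaces are one honking great idea -- let's do more of those!
-- """
--
-- vowels = 'aeiou'
--
-- def strip_vowels(text=text):
--     """Replace all vowels by *, return newly formed string
--        and number of replacements done"""
--     words = text.split()
--     new_words = []
--     number_replacements = 0
--     for word in words:
--         characters = list(word)
--         new_character_list = []
--         for character in characters:
--             if str(character).lower() in vowels:
--                 character = "*"
--                 number_replacements += 1
--             new_character_list.append(character)
--         new_character_list = ''.join(new_character_list)
--         new_words.append(new_character_list)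
--     output = " ".join(new_words)
--
--     return output, number_replacements
-- ===== SOURCE B (Python) =====
-- text = """
-- The Zen of Python, by Tim Peters
--
-- Beautiful is better than ugly.
-- Explicit is better than implicit.
-- Simple is better than complex.
-- Complex is better than complicated.
-- Flat is better than nested.
-- Sparse is better than dense.
-- Readability counts.
-- Special cases aren't special enough to break the rules.
-- Although practicality beats purity.
-- Errors should never pass silently.
-- Unless explicitly silenced.
-- In the face of ambiguity, refuse the temptation to guess.
-- There should be one-- and preferably only one --obvious way to do it.
-- Although that way may not be obvious at first unless you're Dutch.
-- Now is better than never.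
-- Although never is often better than *right* now.
-- If the implementation is hard to explain, it's a bad idea.
-- If the implementation is easy to explain, it may be a good idea.
-- Namespaces are one honking great idea -- let's do more of those!
-- """
--
-- vowels = 'aeiou'
--
-- _TABLE = str.maketrans('aeiouAEIOU', '*' * 10)
--
-- def strip_vowels(text=text):
--     """Replace all vowels by *, return newly formed string
--        and number of replacements done"""
--     normalized = ' '.join(text.split())
--     output = normalized.translate(_TABLE)
--     number_replacements = sum(1 for c in normalized if c.lower() in vowels)
--     return output, number_replacements
-- ===== Notes on version B (the rewrite author's own statement) =====
-- stated objective: idiomatic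
-- what changed: A's nested per-word/per-character loop with a shared mutable counter is replaced by a flat pipeline: whitespace is normalized once by splitting and rejoining, all vowels are replaced in one str.translate call with a precomputed table, and the replacement count is computed in a separate pass.
import Mathlib
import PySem

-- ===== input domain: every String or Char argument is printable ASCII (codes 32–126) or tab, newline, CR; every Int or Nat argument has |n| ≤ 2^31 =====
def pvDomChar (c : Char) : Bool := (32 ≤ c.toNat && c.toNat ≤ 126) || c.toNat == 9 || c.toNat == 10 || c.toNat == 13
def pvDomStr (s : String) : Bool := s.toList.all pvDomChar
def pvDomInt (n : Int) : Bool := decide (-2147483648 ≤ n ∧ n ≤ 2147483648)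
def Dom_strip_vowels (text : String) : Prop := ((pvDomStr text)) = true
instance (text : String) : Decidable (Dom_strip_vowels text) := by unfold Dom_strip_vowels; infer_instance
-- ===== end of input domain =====

-- B replaces A's nested word/character loops by whitespace normalization + a translate table + a separate counting pass (idiomatic decomposition, same cost).

-- ===== PORT A =====
-- module constant `vowels = 'aeiou'`
def pyVowels : List Char := ['a', 'e', 'i', 'o', 'u']

-- A's inner loop body: `if str(character).lower() in vowels` on a single char is
-- membership of the lowered char among the vowel chars (exact on chars).
def stripInnerA (st : List Char × Int) (character : Char) : List Char × Int :=
  if PySem.Chars.lowerChar character ∈ pyVowels then (st.1 ++ ['*'], st.2 + 1)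
  else (st.1 ++ [character], st.2)

-- A's outer loop body over `words`
def stripOuterA (acc : List String × Int) (word : String) : List String × Int :=
  let inner := word.toList.foldl stripInnerA ([], acc.2)
  (acc.1 ++ [String.ofList inner.1], inner.2)

def strip_vowels (text : String) : String × Int :=
  let words := PySem.Str.split₀ text
  let r := words.foldl stripOuterA ([], 0)
  (PySem.Str.join " " r.1, r.2)

-- ===== PORT B =====
-- the maketrans table 'aeiouAEIOU' -> '*'
def pyVowelTable : List Char := ['a', 'e', 'i', 'o', 'u', 'A', 'E', 'I', 'O', 'U']

def translateVowel (c : Char) : Char := if c ∈ pyVowelTable then '*' else c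

def strip_vowels_alt (text : String) : String × Int :=
  let normalized := PySem.Str.join " " (PySem.Str.split₀ text)
  let output := String.ofList (normalized.toList.map translateVowel)
  let count := (normalized.toList.filter (fun c => PySem.Chars.lowerChar c ∈ pyVowels)).length
  (output, (count : Int))

-- ===== PRECONDITION & SPEC =====
def Spec_strip_vowels (text : String) (out : String × Int) : Prop := out = strip_vowels_alt text
instance (text : String) (out : String × Int) : Decidable (Spec_strip_vowels text out) := by unfold Spec_strip_vowels; infer_instance

-- ===== CLAIM (what is proved, stated in full; the proofs are below) =====
def Claim_equal_strip_vowels : Prop := ∀ (text : String), Dom_strip_vowels text → Spec_strip_vowels text (strip_vowels text)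

-- ===== LEMMAS AND PROOFS =====

-- A's per-char test and B's table test select the same characters.
lemma char_eq_ofNat (c : Char) (n : Nat) (h : c.toNat = n)
    (hv : (Char.ofNat n).toNat = n) : c = Char.ofNat n := by
  apply Char.ext
  apply UInt32.toNat_inj.mp
  show c.toNat = (Char.ofNat n).toNat
  rw [h, hv]

set_option maxHeartbeats 1000000 in
lemma lower_mem_iff (c : Char) :
    (PySem.Chars.lowerChar c ∈ pyVowels) ↔ (c ∈ pyVowelTable) := by
  unfold PySem.Chars.lowerChar PySem.Chars.isupper pyVowels pyVowelTable
  by_cases h : 'A' ≤ c ∧ c ≤ 'Z'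
  · have h1 : 65 ≤ c.toNat := h.1
    have h2 : c.toNat ≤ 90 := h.2
    simp only [h.1, h.2, decide_true, Bool.and_self, if_pos]
    interval_cases hc : c.toNat <;>
      (rw [char_eq_ofNat c _ hc (by decide)]; decide)
  · have hb : (decide ('A' ≤ c) && decide (c ≤ 'Z')) = false := by
      simp only [Bool.and_eq_false_iff, decide_eq_false_iff_not]
      tauto
    rw [if_neg (by simp [hb])]
    simp only [List.mem_cons, List.not_mem_nil, or_false]
    constructor
    · tauto
    · rintro (rfl | rfl | rfl | rfl | rfl | rfl | rfl | rfl | rfl | rfl) <;> tauto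

lemma inner_eq (cs : List Char) (acc : List Char) (n : Int) :
    cs.foldl stripInnerA (acc, n) =
      (acc ++ cs.map translateVowel,
       n + ((cs.filter (fun c => PySem.Chars.lowerChar c ∈ pyVowels)).length : Int)) := by
  induction cs generalizing acc n with
  | nil => simp
  | cons c cs ih =>
    simp only [List.foldl_cons, List.map_cons, List.filter_cons, stripInnerA]
    by_cases hc : PySem.Chars.lowerChar c ∈ pyVowels
    · have ht : translateVowel c = '*' := by
        unfold translateVowel; rw [if_pos (lower_mem_iff c |>.mp hc)]
      rw [if_pos hc, ih, ht]
      simp [hc]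
      omega
    · have ht : translateVowel c = c := by
        unfold translateVowel; rw [if_neg (fun m => hc ((lower_mem_iff c).mpr m))]
      rw [if_neg hc, ih, ht]
      simp [hc]

lemma outer_eq (ws : List String) (acc : List String) (n : Int) :
    ws.foldl stripOuterA (acc, n) =
      (acc ++ ws.map (fun w => String.ofList (w.toList.map translateVowel)),
       n + (((ws.map (fun w => w.toList.filter (fun c => PySem.Chars.lowerChar c ∈ pyVowels))).flatten).length : Int)) := by
  induction ws generalizing acc n with
  | nil => simp
  | cons w ws ih =>
    simp only [List.foldl_cons, List.map_cons, List.flatten_cons, stripOuterA, inner_eq]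
    rw [ih]
    simp
    omega

-- generic: mapping over an intersperse
lemma map_intersperse_list (g : List Char → List Char) (s : List Char) (l : List (List Char)) :
    (l.intersperse s).map g = (l.map g).intersperse (g s) := by
  induction l with
  | nil => simp
  | cons x l ih =>
    cases l with
    | nil => simp
    | cons y m => simp only [List.intersperse, List.map_cons] at ih ⊢; simp [ih]

lemma flatten_intersperse_nil (l : List (List Char)) :
    (l.intersperse ([] : List Char)).flatten = l.flatten := by
  induction l with
  | nil => simp
  | cons x l ih =>
    cases l with
    | nil => simp
    | cons y m => simp only [List.intersperse, List.flatten_cons] at ih ⊢; simp [ih]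

-- mapping the translate table commutes with joining on a space (space is not a vowel)
lemma map_join (l : List (List Char)) :
    ([' '].intercalate l).map translateVowel = [' '].intercalate (l.map (fun w => w.map translateVowel)) := by
  simp only [List.intercalate, List.map_flatten, map_intersperse_list (g := List.map translateVowel)]
  have : [' '].map translateVowel = [' '] := by decide
  rw [this]

-- filtering by the vowel test commutes with joining on a space (space is not a vowel)
lemma filter_join (l : List (List Char)) :
    ([' '].intercalate l).filter (fun c => PySem.Chars.lowerChar c ∈ pyVowels)
      = (l.map (fun w => w.filter (fun c => PySem.Chars.lowerChar c ∈ pyVowels))).flatten := by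
  simp only [List.intercalate, List.filter_flatten,
    map_intersperse_list (g := List.filter (fun c => decide (PySem.Chars.lowerChar c ∈ pyVowels)))]
  have : [' '].filter (fun c => decide (PySem.Chars.lowerChar c ∈ pyVowels)) = [] := by decide
  rw [this, flatten_intersperse_nil]

-- ===== VERDICT (by name: the statement is the Claim_ definition above) =====
theorem strip_vowels_spec : Claim_equal_strip_vowels := by
  intro text _
  unfold Spec_strip_vowels strip_vowels strip_vowels_alt
  simp only [PySem.Str.split₀, PySem.Str.join, PySem.Chars.join]
  rw [outer_eq]
  simp only [List.nil_append, List.map_map, Function.comp_def, String.toList_ofList,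
    zero_add, List.map_id]
  have hsp : " ".toList = [' '] := by decide
  rw [hsp]
  have hid : List.map (fun x : List Char => x) (PySem.Chars.split₀ text.toList)
      = PySem.Chars.split₀ text.toList := by simp
  congr 1
  · congr 1
    rw [hid, map_join]
  · rw [hid, filter_join]
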